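-- pv_equiv track=rewrite | github.com/RGZ1890/codetree-TILs | 241224/사다리 타기/ladder-game.py | solution
-- ===== SOURCE A (Python) =====
-- INF = 16
--
-- def walk(n, lines):
--     cur = [i for i in range(n + 1)]
--     for i in range(1, n + 1):
--         for l in lines:
--             if cur[i] == l[0]:
--                 cur[i] = l[1]
--             elif cur[i] == l[1]:
--                 cur[i] = l[0]
--
--     return cur[1:]
--
-- def solution(n, m, res, lines, i, picked, cur, ans):
--     if cur >= ans:
--         return INF
--     if i == m:
--         if walk(n, picked) == res:
--             return cur
--         return ans
--
--     return min(solution(n, m, res, lines, i + 1, picked, cur, ans),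
--         solution(n, m, res, lines, i + 1, picked + [lines[i]], cur + 1, ans))
-- ===== SOURCE B (Python) =====
-- INF = 16
--
-- def _swap(l, perm):
--     a, b = l
--     return [b if x == a else a if x == b else x for x in perm]
--
-- def solution(n, m, res, lines, i, picked, cur, ans):
--     if cur >= ans:
--         return INF
--     # permutation produced by the already-picked lines, maintained incrementally below
--     perm = list(range(1, n + 1))
--     for l in picked:
--         perm = _swap(l, perm)
--
--     def rec(j, perm, c):
--         if c >= ans:
--             return INF
--         if j == m:
--             return c if perm == res else ans
--         return min(rec(j + 1, perm, c),
--                    rec(j + 1, _swap(lines[j], perm), c + 1))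
--
--     return rec(i, perm, cur)
-- ===== Notes on version B (the rewrite author's own statement) =====
-- stated objective: alternative
-- what changed: B maintains the ladder permutation incrementally (applying each picked line's swap to the current permutation during the recursion) instead of rerunning the full walk over all picked lines at every leaf of the subset tree.
import Mathlib
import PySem

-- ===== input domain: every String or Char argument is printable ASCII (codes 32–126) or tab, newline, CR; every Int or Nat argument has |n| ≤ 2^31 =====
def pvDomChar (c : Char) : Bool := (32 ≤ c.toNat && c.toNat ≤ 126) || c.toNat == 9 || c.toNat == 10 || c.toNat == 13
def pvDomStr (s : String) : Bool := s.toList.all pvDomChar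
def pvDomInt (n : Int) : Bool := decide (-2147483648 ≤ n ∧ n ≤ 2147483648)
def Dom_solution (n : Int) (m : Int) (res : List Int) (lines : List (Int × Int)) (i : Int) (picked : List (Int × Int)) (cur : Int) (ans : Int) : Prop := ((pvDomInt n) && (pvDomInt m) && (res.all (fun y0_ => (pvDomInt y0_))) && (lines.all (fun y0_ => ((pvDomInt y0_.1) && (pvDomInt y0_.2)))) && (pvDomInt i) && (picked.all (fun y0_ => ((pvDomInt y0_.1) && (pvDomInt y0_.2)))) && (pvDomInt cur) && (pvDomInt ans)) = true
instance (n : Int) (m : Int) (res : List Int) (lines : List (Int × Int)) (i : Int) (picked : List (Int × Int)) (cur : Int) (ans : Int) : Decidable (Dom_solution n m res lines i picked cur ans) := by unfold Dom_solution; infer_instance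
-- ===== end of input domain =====

-- B maintains the permutation incrementally during the recursion instead of rerunning walk over all picked lines at each leaf (objective: alternative; same return value everywhere inside Pre_).

-- ===== PORT A =====
-- inner 'for l in lines: if cur[i]==l[0]: … elif cur[i]==l[1]: …' of walk;
-- pyGetD/pySetD defaults are exact here: i comes from range(1, n+1), always in range of the length-(n+1) list
def walkInner (lines : List (Int × Int)) (c : List Int) (i : Int) : List Int :=
  lines.foldl (fun c l =>
    let v := PySem.List.pyGetD c i 0
    if v = l.1 then PySem.List.pySetD c i l.2
    else if v = l.2 then PySem.List.pySetD c i l.1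
    else c) c

def walk (n : Int) (lines : List (Int × Int)) : List Int :=
  let cur := PySem.List.pyRange 0 (n + 1) 1
  let cur := (PySem.List.pyRange 1 (n + 1) 1).foldl (fun c i => walkInner lines c i) cur
  PySem.List.slice cur (some 1) none

-- fuel (m - i).toNat counts the remaining recursion depth; the fuel-0 fallback 0 is reached
-- only when i > m with cur < ans, where the Python recurses forever (outside Pre_).
-- (pyGet? lines i).getD (0,0) is lines[i]; the default is reached only when Python raises IndexError (outside Pre_)
def solutionGo (fuel : Nat) (n : Int) (m : Int) (res : List Int) (lines : List (Int × Int)) (i : Int) (picked : List (Int × Int)) (cur : Int) (ans : Int) : Int :=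
  if ans ≤ cur then 16
  else if i = m then (if walk n picked = res then cur else ans)
  else
    match fuel with
    | 0 => 0
    | fuel + 1 =>
      min (solutionGo fuel n m res lines (i + 1) picked cur ans)
          (solutionGo fuel n m res lines (i + 1) (picked ++ [(PySem.List.pyGet? lines i).getD (0, 0)]) (cur + 1) ans)

def solution (n : Int) (m : Int) (res : List Int) (lines : List (Int × Int)) (i : Int) (picked : List (Int × Int)) (cur : Int) (ans : Int) : Int :=
  solutionGo (m - i).toNat n m res lines i picked cur ans

-- ===== PORT B =====
-- B's _swap: [b if x==a else a if x==b else x for x in perm]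
def swapVal (l : Int × Int) (x : Int) : Int :=
  if x = l.1 then l.2 else if x = l.2 then l.1 else x

def swapPerm (l : Int × Int) (perm : List Int) : List Int :=
  perm.map (swapVal l)

-- B's rec; same fuel convention as port A
def solutionAltGo (fuel : Nat) (m : Int) (res : List Int) (lines : List (Int × Int)) (j : Int) (perm : List Int) (c : Int) (ans : Int) : Int :=
  if ans ≤ c then 16
  else if j = m then (if perm = res then c else ans)
  else
    match fuel with
    | 0 => 0
    | fuel + 1 =>
      min (solutionAltGo fuel m res lines (j + 1) perm c ans)
          (solutionAltGo fuel m res lines (j + 1) (swapPerm ((PySem.List.pyGet? lines j).getD (0, 0)) perm) (c + 1) ans)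

def solution_alt (n : Int) (m : Int) (res : List Int) (lines : List (Int × Int)) (i : Int) (picked : List (Int × Int)) (cur : Int) (ans : Int) : Int :=
  if ans ≤ cur then 16
  else
    let perm := picked.foldl (fun p l => swapPerm l p) (PySem.List.pyRange 1 (n + 1) 1)
    solutionAltGo (m - i).toNat m res lines i perm cur ans

-- ===== PRECONDITION & SPEC =====
-- Pre_ excludes exactly the inputs where Python A does not return: i > m with cur < ans (infinite
-- recursion) and an index j in [i, m) out of range of lines, i.e. j < -len(lines) or j >= len(lines)
-- (IndexError); when cur >= ans A returns at once.
def Pre_solution (n : Int) (m : Int) (res : List Int) (lines : List (Int × Int)) (i : Int) (picked : List (Int × Int)) (cur : Int) (ans : Int) : Prop :=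
  ans ≤ cur ∨ i = m ∨ (i < m ∧ -(lines.length : Int) ≤ i ∧ m ≤ (lines.length : Int))
instance (n : Int) (m : Int) (res : List Int) (lines : List (Int × Int)) (i : Int) (picked : List (Int × Int)) (cur : Int) (ans : Int) : Decidable (Pre_solution n m res lines i picked cur ans) := by unfold Pre_solution; infer_instance

def pvWitness_solution : Int × Int × List Int × (List (Int × Int)) × Int × (List (Int × Int)) × Int × Int :=
  (2, 1, [1, 2], [(1, 2)], 0, [], 0, 5)

def Spec_solution (n : Int) (m : Int) (res : List Int) (lines : List (Int × Int)) (i : Int) (picked : List (Int × Int)) (cur : Int) (ans : Int) (out : Int) : Prop := out = solution_alt n m res lines i picked cur ans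
instance (n : Int) (m : Int) (res : List Int) (lines : List (Int × Int)) (i : Int) (picked : List (Int × Int)) (cur : Int) (ans : Int) (out : Int) : Decidable (Spec_solution n m res lines i picked cur ans out) := by unfold Spec_solution; infer_instance

-- ===== CLAIM (what is proved, stated in full; the proofs are below) =====
def Claim_equal_solution : Prop := ∀ (n : Int) (m : Int) (res : List Int) (lines : List (Int × Int)) (i : Int) (picked : List (Int × Int)) (cur : Int) (ans : Int), Dom_solution n m res lines i picked cur ans → Pre_solution n m res lines i picked cur ans → Spec_solution n m res lines i picked cur ans (solution n m res lines i picked cur ans)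

-- ===== LEMMAS AND PROOFS =====

-- applying all lines to one value, in order (what walk computes per start position)
def appLines (lines : List (Int × Int)) (x : Int) : Int :=
  lines.foldl (fun v l => swapVal l v) x

theorem set_getD_self (c : List Int) (k : Nat) (hk : k < c.length) :
    c.set k (c.getD k 0) = c := by
  apply List.ext_getElem (by simp)
  intro j h1 h2
  rw [List.getElem_set]
  split_ifs with hj
  · subst hj
    rw [List.getD_eq_getElem?_getD, List.getElem?_eq_getElem hk]
    rfl
  · rfl

theorem walkInner_set (lines : List (Int × Int)) (c : List Int) (k : Nat) (hk : k < c.length) :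
    walkInner lines c (k : Int) = c.set k (appLines lines (c.getD k 0)) := by
  induction lines generalizing c with
  | nil =>
    simpa [walkInner, appLines] using (set_getD_self c k hk).symm
  | cons l ls ih =>
    have hstep : walkInner (l :: ls) c (k : Int)
        = walkInner ls (c.set k (swapVal l (c.getD k 0))) (k : Int) := by
      have h0 : walkInner (l :: ls) c (k : Int)
          = walkInner ls (if PySem.List.pyGetD c (k : Int) 0 = l.1 then PySem.List.pySetD c (k : Int) l.2
              else if PySem.List.pyGetD c (k : Int) 0 = l.2 then PySem.List.pySetD c (k : Int) l.1 else c) (k : Int) := rfl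
      rw [h0]
      congr 1
      rw [PySem.List.pyGetD_natCast, PySem.List.pySetD_natCast, PySem.List.pySetD_natCast]
      unfold swapVal
      split_ifs
      · rfl
      · rfl
      · exact (set_getD_self c k hk).symm
    rw [hstep, ih _ (by simpa using hk), List.set_set]
    congr 1
    have hv : (c.set k (swapVal l (c.getD k 0))).getD k 0 = swapVal l (c.getD k 0) := by
      simp [List.getD_eq_getElem?_getD, hk]
    rw [hv]
    rfl

theorem walkInner_length (lines : List (Int × Int)) (c : List Int) (k : Nat) (hk : k < c.length) :
    (walkInner lines c (k : Int)).length = c.length := by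
  rw [walkInner_set lines c k hk]; simp

theorem walkInner_append (lines : List (Int × Int)) (c : List Int) (x : Int) (k : Nat) (hk : k < c.length) :
    walkInner lines (c ++ [x]) (k : Int) = walkInner lines c (k : Int) ++ [x] := by
  rw [walkInner_set lines (c ++ [x]) k (by simp; omega), walkInner_set lines c k hk]
  have h1 : (c ++ [x]).getD k 0 = c.getD k 0 := by
    simp [List.getD_eq_getElem?_getD, List.getElem?_append_left hk]
  rw [h1, List.set_append_left _ _ hk]

theorem foldWalk_append (lines : List (Int × Int)) (idxs : List Int) (c : List Int) (x : Int)
    (h : ∀ j ∈ idxs, 0 ≤ j ∧ j.toNat < c.length) :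
    idxs.foldl (fun c i => walkInner lines c i) (c ++ [x])
      = idxs.foldl (fun c i => walkInner lines c i) c ++ [x] := by
  induction idxs generalizing c with
  | nil => rfl
  | cons j js ih =>
    have hj := h j (List.mem_cons_self)
    have hjc : j = ((j.toNat : Nat) : Int) := by omega
    simp only [List.foldl_cons]
    rw [hjc, walkInner_append lines c x j.toNat hj.2, ih _ (fun a ha => by
      have := h a (List.mem_cons_of_mem _ ha)
      exact ⟨this.1, by rw [walkInner_length lines c j.toNat hj.2]; exact this.2⟩)]

theorem walk_char_nat (lines : List (Int × Int)) (N : Nat) :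
    (PySem.List.pyRange 1 ((N : Int) + 1) 1).foldl (fun c i => walkInner lines c i)
        (PySem.List.pyRange 0 ((N : Int) + 1) 1)
      = 0 :: (PySem.List.pyRange 1 ((N : Int) + 1) 1).map (appLines lines) := by
  induction N with
  | zero =>
    rw [PySem.List.pyRange_one_eq_nil (a := 1) (by omega)]
    simpa using PySem.List.pyRange_one_singleton (a := 0)
  | succ N ih =>
    have h1 : ((N + 1 : Nat) : Int) + 1 = ((N : Int) + 1) + 1 := by push_cast; ring
    rw [h1, PySem.List.pyRange_one_succ_right (a := 1) (by omega),
        PySem.List.pyRange_one_succ_right (a := 0) (by omega)]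
    rw [List.foldl_append, foldWalk_append lines _ _ _ (fun j hj => by
      rw [PySem.List.mem_pyRange_one] at hj
      refine ⟨by omega, ?_⟩
      rw [PySem.List.length_pyRange_one]; omega), ih]
    have hlen : (0 :: (PySem.List.pyRange 1 ((N : Int) + 1) 1).map (appLines lines)).length = N + 1 := by
      simp [PySem.List.length_pyRange_one]
    simp only [List.foldl_cons, List.foldl_nil]
    have hws := walkInner_set lines
      ((0 :: (PySem.List.pyRange 1 ((N : Int) + 1) 1).map (appLines lines)) ++ [(N : Int) + 1])
      (N + 1) (by simp)
    push_cast at hws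
    rw [hws]
    have hget : ((0 :: (PySem.List.pyRange 1 ((N : Int) + 1) 1).map (appLines lines)) ++ [(N : Int) + 1]).getD (N + 1) 0
        = (N : Int) + 1 := by
      rw [List.getD_eq_getElem?_getD, List.getElem?_append_right (by omega)]
      simp [hlen]
    rw [hget]
    rw [show N + 1 = (0 :: (PySem.List.pyRange 1 ((N : Int) + 1) 1).map (appLines lines)).length + 0 from by omega,
        List.set_append_right]
    · simp
    · omega

theorem walk_char (n : Int) (lines : List (Int × Int)) :
    walk n lines = (PySem.List.pyRange 1 (n + 1) 1).map (appLines lines) := by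
  by_cases hn : 0 < n
  · have hcast : n = ((n.toNat : Nat) : Int) := by omega
    rw [hcast]
    show PySem.List.slice _ (some 1) none = _
    rw [walk_char_nat lines n.toNat, PySem.List.slice_from _ (by norm_num)]
    simp
  · show PySem.List.slice _ (some 1) none = _
    rw [PySem.List.pyRange_one_eq_nil (a := 1) (by omega), PySem.List.slice_from _ (by norm_num)]
    by_cases h0 : n = 0
    · subst h0
      simpa using congrArg (List.drop 1) (PySem.List.pyRange_one_singleton (a := 0))
    · rw [PySem.List.pyRange_one_eq_nil (a := 0) (by omega)]
      simp

theorem walk_concat (n : Int) (P : List (Int × Int)) (l : Int × Int) :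
    walk n (P ++ [l]) = swapPerm l (walk n P) := by
  rw [walk_char, walk_char, swapPerm, List.map_map]
  apply List.map_congr_left
  intro x _
  simp only [Function.comp_apply, appLines, List.foldl_append, List.foldl_cons, List.foldl_nil]

theorem foldl_swap_eq_walk (n : Int) (picked : List (Int × Int)) :
    picked.foldl (fun p l => swapPerm l p) (PySem.List.pyRange 1 (n + 1) 1) = walk n picked := by
  induction picked using List.reverseRecOn with
  | nil =>
    have h : appLines ([] : List (Int × Int)) = id := funext fun x => rfl
    rw [walk_char, h, List.map_id]
    rfl
  | append_singleton P l ih =>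
    rw [List.foldl_append, walk_concat]
    simp [ih]

theorem go_eq (fuel : Nat) (n m : Int) (res : List Int) (lines : List (Int × Int)) :
    ∀ (i : Int) (picked : List (Int × Int)) (cur ans : Int),
      solutionGo fuel n m res lines i picked cur ans
        = solutionAltGo fuel m res lines i (walk n picked) cur ans := by
  induction fuel with
  | zero => intro i picked cur ans; rfl
  | succ fuel ih =>
    intro i picked cur ans
    simp only [solutionGo, solutionAltGo]
    rw [ih, ih, walk_concat]

-- ===== VERDICT (by name: the statement is the Claim_ definition above) =====
theorem solution_spec : Claim_equal_solution := by
  intro n m res lines i picked cur ans _ _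
  show solution n m res lines i picked cur ans = solution_alt n m res lines i picked cur ans
  unfold solution solution_alt
  by_cases hc : ans ≤ cur
  · simp only [hc, if_true]
    cases h : (m - i).toNat <;> simp [solutionGo, hc]
  · simp only [hc, if_false]
    rw [go_eq, foldl_swap_eq_walk]
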